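-- pv_equiv track=rewrite | github.com/olahesoo/adventofcode | 2022/25/solution.py | encode_SNAFU
-- ===== SOURCE A (Python) =====
-- digits = {
--         '2': 2,
--         '1': 1,
--         '0': 0,
--         '-': -1,
--         '=': -2
--         }
--
-- digit_order = ['0', '1', '2', '=', '-']
--
-- def encode_SNAFU(number):
--     rev_output = []
--     while number:
--         digit = digit_order[number % 5]
--         rev_output.append(digit)
--         number -= digits[digit]
--         number = int(number / 5)
--     return ''.join(rev_output[::-1])
-- ===== SOURCE B (Python) =====
-- def encode_SNAFU(number):
--     if not number:
--         return ''
--     # pass 1: plain base-5 digits of |number|, least-significant first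
--     m = abs(number)
--     digits = []
--     while m:
--         digits.append(m % 5)
--         m //= 5
--     # pass 2: carry propagation turning base-5 digits into SNAFU chars
--     chars = []
--     carry = 0
--     for d in digits:
--         v = d + carry
--         chars.append("012=-0"[v])
--         carry = 1 if v >= 3 else 0
--     if carry:
--         chars.append('1')
--     # negative input: negate every SNAFU digit
--     if number < 0:
--         chars = [{'0': '0', '1': '-', '2': '=', '=': '2', '-': '1'}[c] for c in chars]
--     return ''.join(reversed(chars))
-- ===== Notes on version B (the rewrite author's own statement) =====
-- stated objective: alternative
-- what changed: A interleaves digit selection with an adjust-then-divide loop on the signed number; B instead computes the plain base-5 digits of |n| in one pass, converts them to SNAFU chars in a separate carry-propagation pass, and digit-wise negates the result for negative inputs.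
import Mathlib
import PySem

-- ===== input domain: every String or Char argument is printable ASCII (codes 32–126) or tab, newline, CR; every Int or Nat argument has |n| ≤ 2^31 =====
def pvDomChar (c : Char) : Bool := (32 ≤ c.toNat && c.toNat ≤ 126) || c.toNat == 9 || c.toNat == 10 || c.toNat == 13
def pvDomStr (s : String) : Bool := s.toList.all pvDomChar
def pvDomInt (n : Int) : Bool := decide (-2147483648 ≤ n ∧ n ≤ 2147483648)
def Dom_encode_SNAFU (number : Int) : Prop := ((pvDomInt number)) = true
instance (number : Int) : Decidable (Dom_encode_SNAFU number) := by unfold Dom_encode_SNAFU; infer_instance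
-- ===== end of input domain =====

-- B re-derives SNAFU by two separate passes (plain base-5 digits of |n|, then a carry pass,
-- then digit-wise negation for negative inputs) instead of A's interleaved adjust-and-divide
-- loop; objective: alternative decomposition, same cost. Return value only; no mutation.


-- ===== PORT A =====
-- module-level dict `digits` (char -> value); literal-key lookup written as a total match
def pvDigitsVal (c : Char) : Int :=
  if c = '2' then 2 else if c = '1' then 1 else if c = '0' then 0
  else if c = '-' then -1 else -2

-- module-level list `digit_order`
def pvDigitOrder : List Char := ['0', '1', '2', '=', '-']

-- A's while loop, with a fuel bound (|number| strictly decreases, so |number| iterations suffice);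
-- it collects chars least-significant first (`rev_output`, appended per step).
-- `digit_order[number % 5]`: index always in range (0 ≤ n % 5 < 5), so the `.getD '0'` default is dead.
-- `int(number / 5)`: CPython truncates toward zero; = Int.tdiv exactly for |n| ≤ 2^31 < 2^53.
def pvALoopF : Nat → Int → List Char
  | 0, _ => []
  | fuel + 1, number =>
    if number = 0 then []
    else ((PySem.List.pyGet? pvDigitOrder (number % 5)).getD '0')
      :: pvALoopF fuel ((number - pvDigitsVal ((PySem.List.pyGet? pvDigitOrder (number % 5)).getD '0')).tdiv 5)

def pvALoop (number : Int) : List Char := pvALoopF number.natAbs number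

-- `''.join(rev_output[::-1])`: reverse, then join
def encode_SNAFU (number : Int) : String :=
  String.mk (pvALoop number).reverse

-- ===== PORT B =====
-- pass 1: plain base-5 digits of |number|, least-significant first (B's first while loop;
-- fuel bound: m strictly decreases under / 5, so m iterations suffice)
def pvBase5F : Nat → Nat → List Nat
  | 0, _ => []
  | fuel + 1, m => if m = 0 then [] else m % 5 :: pvBase5F fuel (m / 5)

def pvBase5 (m : Nat) : List Nat := pvBase5F m m

-- pass 2: B's for loop with its carry accumulator; `"012=-0"[v]`; a trailing carry appends '1'
def pvCarry : List Nat → Nat → List Char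
  | [], carry => if carry ≠ 0 then ['1'] else []
  | d :: ds, carry =>
      ((PySem.Str.pyGet? "012=-0" ((d + carry : Nat) : Int)).getD '0')
        :: pvCarry ds (if d + carry ≥ 3 then 1 else 0)

-- the digit-negation table used for negative inputs
def pvNegC (c : Char) : Char :=
  if c = '0' then '0' else if c = '1' then '-' else if c = '2' then '='
  else if c = '=' then '2' else '1'

def encode_SNAFU_alt (number : Int) : String :=
  if number = 0 then ""
  else
    let chars := pvCarry (pvBase5 number.natAbs) 0
    let chars := if number < 0 then chars.map pvNegC else chars
    String.mk chars.reverse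

-- ===== PRECONDITION & SPEC =====
def Spec_encode_SNAFU (number : Int) (out : String) : Prop := out = encode_SNAFU_alt number
instance (number : Int) (out : String) : Decidable (Spec_encode_SNAFU number out) := by unfold Spec_encode_SNAFU; infer_instance

-- ===== CLAIM (what is proved, stated in full; the proofs are below) =====
def Claim_equal_encode_SNAFU : Prop := ∀ (number : Int), Dom_encode_SNAFU number → Spec_encode_SNAFU number (encode_SNAFU number)

-- ===== LEMMAS AND PROOFS =====

-- `digit_order[number % 5]` followed by the dict lookup, evaluated for the 5 possible remainders
theorem pvAdjust_eval (r : Int) (h0 : 0 ≤ r) (h5 : r < 5) :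
    pvDigitsVal ((PySem.List.pyGet? pvDigitOrder r).getD '0') = if r ≤ 2 then r else r - 5 := by
  interval_cases r <;> decide

-- A's loop shrinks |number| each iteration (used for the fuel bound below)
theorem pvALoop_dec (n : Int) (hn : ¬ n = 0) :
    ((n - pvDigitsVal ((PySem.List.pyGet? pvDigitOrder (n % 5)).getD '0')).tdiv 5).natAbs
      < n.natAbs := by
  rw [pvAdjust_eval (n % 5) (by omega) (by omega)]
  have hd : (5 : Int) ∣ (n - if n % 5 ≤ 2 then n % 5 else n % 5 - 5) := by
    split_ifs <;> omega
  rw [Int.tdiv_eq_ediv_of_dvd hd]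
  split_ifs <;> omega


-- the SNAFU char A picks for a given remainder `number % 5`
def pvDChar (r : Int) : Char :=
  if r = 0 then '0' else if r = 1 then '1' else if r = 2 then '2'
  else if r = 3 then '=' else '-'

theorem pvChar_eval (r : Int) (h0 : 0 ≤ r) (h5 : r < 5) :
    (PySem.List.pyGet? pvDigitOrder r).getD '0' = pvDChar r := by
  interval_cases r <;> decide

-- fuel irrelevance: any fuel ≥ |n| computes the same list
theorem pvALoopF_congr : ∀ (fuel fuel' : Nat) (n : Int), n.natAbs ≤ fuel → n.natAbs ≤ fuel' →
    pvALoopF fuel n = pvALoopF fuel' n := by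
  intro fuel
  induction fuel with
  | zero =>
    intro fuel' n h _
    have hn : n = 0 := by omega
    subst hn
    cases fuel' <;> simp [pvALoopF]
  | succ fuel ih =>
    intro fuel' n h h'
    by_cases hn : n = 0
    · subst hn
      cases fuel' <;> simp [pvALoopF]
    · obtain ⟨k, hk⟩ : ∃ k, fuel' = k + 1 := ⟨fuel' - 1, by omega⟩
      subst hk
      simp only [pvALoopF, hn, if_false]
      congr 1
      exact ih k _ (by have := pvALoop_dec n hn; omega) (by have := pvALoop_dec n hn; omega)

theorem pvALoop_zero : pvALoop 0 = [] := rfl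

theorem pvBase5F_congr : ∀ (fuel fuel' m : Nat), m ≤ fuel → m ≤ fuel' →
    pvBase5F fuel m = pvBase5F fuel' m := by
  intro fuel
  induction fuel with
  | zero =>
    intro fuel' m h _
    have hm : m = 0 := by omega
    subst hm
    cases fuel' <;> simp [pvBase5F]
  | succ fuel ih =>
    intro fuel' m h h'
    by_cases hm : m = 0
    · subst hm
      cases fuel' <;> simp [pvBase5F]
    · obtain ⟨k, hk⟩ : ∃ k, fuel' = k + 1 := ⟨fuel' - 1, by omega⟩
      subst hk
      simp only [pvBase5F, hm, if_false]
      congr 1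
      have hd : m / 5 < m := Nat.div_lt_self (Nat.pos_of_ne_zero hm) (by norm_num)
      exact ih k _ (by omega) (by omega)

theorem pvBase5_zero : pvBase5 0 = [] := rfl

theorem pvBase5_pos (m : Nat) (hm : m ≠ 0) : pvBase5 m = m % 5 :: pvBase5 (m / 5) := by
  obtain ⟨k, hk⟩ : ∃ k, m = k + 1 := ⟨m - 1, by omega⟩
  subst hk
  show pvBase5F (k + 1) (k + 1) = _
  simp only [pvBase5F, Nat.succ_ne_zero, if_false]
  congr 1
  have hd : (k + 1) / 5 < k + 1 := Nat.div_lt_self (by omega) (by norm_num)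
  exact pvBase5F_congr k ((k + 1) / 5) ((k + 1) / 5) (by omega) (by omega)

-- one step of A's loop, the truncating division rewritten into Euclidean form
theorem pvALoop_step (n : Int) (hn : n ≠ 0) :
    pvALoop n = pvDChar (n % 5) :: pvALoop (n / 5 + if 3 ≤ n % 5 then 1 else 0) := by
  unfold pvALoop
  obtain ⟨k, hk⟩ : ∃ k, n.natAbs = k + 1 := ⟨n.natAbs - 1, by omega⟩
  rw [hk]
  simp only [pvALoopF, hn, if_false]
  have htail : pvALoopF k ((n - pvDigitsVal ((PySem.List.pyGet? pvDigitOrder (n % 5)).getD '0')).tdiv 5)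
      = pvALoop ((n - pvDigitsVal ((PySem.List.pyGet? pvDigitOrder (n % 5)).getD '0')).tdiv 5) := by
    exact pvALoopF_congr k _ _ (by have := pvALoop_dec n hn; omega) (by omega)
  rw [htail]
  unfold pvALoop
  rw [pvAdjust_eval (n % 5) (by omega) (by omega), pvChar_eval (n % 5) (by omega) (by omega)]
  have hd : (5 : Int) ∣ (n - if n % 5 ≤ 2 then n % 5 else n % 5 - 5) := by
    split_ifs <;> omega
  rw [Int.tdiv_eq_ediv_of_dvd hd]
  have harg : (n - if n % 5 ≤ 2 then n % 5 else n % 5 - 5) / 5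
      = n / 5 + if 3 ≤ n % 5 then 1 else 0 := by
    rcases (by omega : n % 5 = 0 ∨ n % 5 = 1 ∨ n % 5 = 2 ∨ n % 5 = 3 ∨ n % 5 = 4) with
      h | h | h | h | h <;> simp only [h] <;> norm_num <;> omega
  rw [harg]

-- head of one carry-pass step agrees with A's digit char
theorem pvHead_eq (r c : Nat) (hr : r < 5) (hc : c ≤ 1) :
    pvDChar (((r : Int) + (c : Int)) % 5)
      = (PySem.Str.pyGet? "012=-0" ((r + c : Nat) : Int)).getD '0' := by
  interval_cases r <;> interval_cases c <;> decide

-- A's loop on m + carry equals B's carry pass over the plain base-5 digits of m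
theorem pvALoop_carry (m : Nat) :
    ∀ c : Nat, c ≤ 1 → pvALoop ((m : Int) + (c : Int)) = pvCarry (pvBase5 m) c := by
  induction m using Nat.strong_induction_on with
  | _ m ih =>
    intro c hc
    by_cases hm : m = 0
    · subst hm
      rw [pvBase5_zero]
      interval_cases c
      · simpa [pvCarry] using pvALoop_zero
      · have h01 : ((0 : ℕ) : ℤ) + ((1 : ℕ) : ℤ) = 1 := by norm_num
        rw [h01, pvALoop_step 1 (by norm_num)]
        norm_num [pvDChar, pvCarry, pvALoop_zero]
    · rw [pvBase5_pos m hm]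
      have hn : ((m : Int) + (c : Int)) ≠ 0 := by omega
      rw [pvALoop_step _ hn]
      have hrec : m / 5 < m := Nat.div_lt_self (Nat.pos_of_ne_zero hm) (by norm_num)
      have hc' : (if m % 5 + c ≥ 3 then (1 : Nat) else 0) ≤ 1 := by split_ifs <;> norm_num
      have hnext : ((m : Int) + (c : Int)) / 5
            + (if 3 ≤ ((m : Int) + (c : Int)) % 5 then (1 : Int) else 0)
          = ((m / 5 : Nat) : Int) + (((if m % 5 + c ≥ 3 then (1 : Nat) else 0) : Nat) : Int) := by
        split_ifs <;> push_cast <;> omega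
      rw [hnext, ih (m / 5) hrec _ hc']
      show _ :: _ = pvCarry (m % 5 :: pvBase5 (m / 5)) c
      rw [pvCarry]
      congr 1
      have hmod : ((m : Int) + (c : Int)) % 5 = (((m % 5 : Nat) : Int) + (c : Int)) % 5 := by
        omega
      rw [hmod]
      exact pvHead_eq (m % 5) c (Nat.mod_lt _ (by norm_num)) hc

-- A on -m is A on m with every digit negated
theorem pvALoop_neg (m : Nat) : pvALoop (-(m : Int)) = (pvALoop (m : Int)).map pvNegC := by
  induction m using Nat.strong_induction_on with
  | _ m ih =>
    by_cases hm : m = 0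
    · subst hm
      simp [pvALoop_zero]
    · have hn : ((m : Int)) ≠ 0 := by omega
      have hn' : (-(m : Int)) ≠ 0 := by omega
      rw [pvALoop_step _ hn, pvALoop_step _ hn', List.map_cons]
      have hneg : pvDChar ((-(m : Int)) % 5) = pvNegC (pvDChar ((m : Int) % 5)) := by
        have h5 : (m : Int) % 5 = 0 ∨ (m : Int) % 5 = 1 ∨ (m : Int) % 5 = 2
            ∨ (m : Int) % 5 = 3 ∨ (m : Int) % 5 = 4 := by omega
        have hm5 : (-(m : Int)) % 5 = (5 - (m : Int) % 5) % 5 := by omega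
        rcases h5 with h | h | h | h | h <;> rw [hm5, h] <;> decide
      have harg : (-(m : Int)) / 5 + (if 3 ≤ (-(m : Int)) % 5 then (1 : Int) else 0)
          = -(((m : Int)) / 5 + (if 3 ≤ ((m : Int)) % 5 then (1 : Int) else 0)) := by
        split_ifs <;> omega
      have hnat : ((m : Int)) / 5 + (if 3 ≤ ((m : Int)) % 5 then (1 : Int) else 0)
          = ((m / 5 + (if 3 ≤ m % 5 then 1 else 0) : Nat) : Int) := by
        split_ifs <;> push_cast <;> omega
      have hlt : m / 5 + (if 3 ≤ m % 5 then 1 else 0) < m := by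
        split_ifs <;> omega
      rw [hneg, harg, hnat, ih _ hlt, ← hnat]

-- ===== VERDICT (by name: the statement is the Claim_ definition above) =====
theorem encode_SNAFU_spec : Claim_equal_encode_SNAFU := by
  intro number _
  unfold Spec_encode_SNAFU encode_SNAFU encode_SNAFU_alt
  rcases lt_trichotomy number 0 with hneg | hzero | hpos
  · have hne : number ≠ 0 := by omega
    simp only [hne, if_false, hneg, if_true]
    have h1 : pvALoop number = (pvCarry (pvBase5 number.natAbs) 0).map pvNegC := by
      have habs : number = -(number.natAbs : Int) := by omega
      rw [habs]
      simp only [Int.natAbs_neg, Int.natAbs_natCast]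
      rw [pvALoop_neg]
      congr 1
      simpa using pvALoop_carry number.natAbs 0 (by norm_num)
    rw [h1]
  · subst hzero
    simp [pvALoop_zero]
    rfl
  · have hne : number ≠ 0 := by omega
    have hnlt : ¬ number < 0 := by omega
    simp only [hne, if_false, hnlt]
    have h1 : pvALoop number = pvCarry (pvBase5 number.natAbs) 0 := by
      have habs : number = ((number.natAbs : Int)) := by omega
      rw [habs]
      simp only [Int.natAbs_natCast]
      simpa using pvALoop_carry number.natAbs 0 (by norm_num)
    rw [h1]
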